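-- pv_equiv track=rewrite | github.com/gustavo-moro/SisCom | CodificaçãoMultinível.py | encode_MLT3
-- ===== SOURCE A (Python) =====
-- def encode_MLT3(binary):
--     signal = []
--     current_level = 0
--     prev_non_zero_positive = False
--
--     for bit in binary:
--         if bit == '1' and current_level != 0:
--             signal.append(0 )
--             current_level = 0
--         elif bit == '1' and current_level == 0:
--             if prev_non_zero_positive:
--                 signal.append(-1)
--                 current_level = -1
--                 prev_non_zero_positive = False
--             else:
--                 signal.append(1)
--                 current_level = 1
--                 prev_non_zero_positive = True
--         else:
--             signal.append(current_level)
--     return signal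
-- ===== SOURCE B (Python) =====
-- def encode_MLT3(binary):
--     levels = [0, 1, 0, -1]
--     idx = 0
--     out = []
--     for bit in binary:
--         if bit == '1':
--             idx = (idx + 1) % 4
--         out.append(levels[idx])
--     return out
-- ===== Notes on version B (the rewrite author's own statement) =====
-- stated objective: simpler
-- what changed: Replaces A's (current_level, prev_non_zero_positive) state pair and four-way branch with a single modular index into a fixed 4-entry level cycle table [0,1,0,-1].
import Mathlib
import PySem

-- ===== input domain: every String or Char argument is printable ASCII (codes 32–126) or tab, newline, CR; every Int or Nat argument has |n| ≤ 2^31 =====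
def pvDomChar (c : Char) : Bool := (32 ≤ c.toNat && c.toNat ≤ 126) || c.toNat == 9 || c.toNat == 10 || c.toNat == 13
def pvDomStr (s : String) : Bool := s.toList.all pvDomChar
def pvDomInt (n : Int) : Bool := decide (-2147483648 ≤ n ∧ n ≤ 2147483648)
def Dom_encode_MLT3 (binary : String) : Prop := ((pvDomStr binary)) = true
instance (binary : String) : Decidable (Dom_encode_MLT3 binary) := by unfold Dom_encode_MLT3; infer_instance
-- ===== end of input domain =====

-- B replaces A's (current_level, prev_non_zero_positive) state pair with one modular index
-- into the fixed MLT-3 cycle table [0,1,0,-1] (objective: simpler).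

-- ===== PORT A =====
-- A's loop over the bits; state = (current_level, prev_non_zero_positive), list built by append (cons here).
def encodeA : List Char → Int → Bool → List Int
  | [], _, _ => []
  | bit :: rest, currentLevel, prevNonZeroPositive =>
    if bit = '1' ∧ currentLevel ≠ 0 then
      0 :: encodeA rest 0 prevNonZeroPositive
    else if bit = '1' ∧ currentLevel = 0 then
      if prevNonZeroPositive then
        (-1) :: encodeA rest (-1) false
      else
        1 :: encodeA rest 1 true
    else
      currentLevel :: encodeA rest currentLevel prevNonZeroPositive

def encode_MLT3 (binary : String) : List Int :=
  encodeA binary.toList 0 false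

-- ===== PORT B =====
def levelsB : List Int := [0, 1, 0, -1]

-- B's loop: advance the cycle index on '1', emit levels[idx].
def encodeB : List Char → Nat → List Int
  | [], _ => []
  | bit :: rest, idx =>
    if bit = '1' then
      levelsB.getD ((idx + 1) % 4) 0 :: encodeB rest ((idx + 1) % 4)
    else
      levelsB.getD idx 0 :: encodeB rest idx

def encode_MLT3_alt (binary : String) : List Int :=
  encodeB binary.toList 0

-- ===== PRECONDITION & SPEC =====
def Spec_encode_MLT3 (binary : String) (out : List Int) : Prop := out = encode_MLT3_alt binary
instance (binary : String) (out : List Int) : Decidable (Spec_encode_MLT3 binary out) := by unfold Spec_encode_MLT3; infer_instance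

-- ===== CLAIM (what is proved, stated in full; the proofs are below) =====
def Claim_equal_encode_MLT3 : Prop := ∀ (binary : String), Dom_encode_MLT3 binary → Spec_encode_MLT3 binary (encode_MLT3 binary)

-- ===== LEMMAS AND PROOFS =====

-- State correspondence: B's index idx ∈ {0,1,2,3} encodes A's pair
-- (current_level, prev_non_zero_positive) as 0↦(0,false), 1↦(1,true), 2↦(0,true), 3↦(-1,false).
def lvlOf : Nat → Int
  | 1 => 1 | 3 => -1 | _ => 0

def prevOf : Nat → Bool
  | 1 => true | 2 => true | _ => false

theorem encodeA_eq_encodeB (cs : List Char) :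
    ∀ idx : Nat, idx < 4 → encodeA cs (lvlOf idx) (prevOf idx) = encodeB cs idx := by
  induction cs with
  | nil => intro idx _; simp [encodeA, encodeB]
  | cons c rest ih =>
    intro idx hidx
    by_cases hc : c = '1'
    · interval_cases idx
      · simpa [encodeA, encodeB, hc, levelsB, lvlOf, prevOf] using ih 1 (by norm_num)
      · simpa [encodeA, encodeB, hc, levelsB, lvlOf, prevOf] using ih 2 (by norm_num)
      · simpa [encodeA, encodeB, hc, levelsB, lvlOf, prevOf] using ih 3 (by norm_num)
      · simpa [encodeA, encodeB, hc, levelsB, lvlOf, prevOf] using ih 0 (by norm_num)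
    · interval_cases idx
      · simpa [encodeA, encodeB, hc, levelsB, lvlOf, prevOf] using ih 0 (by norm_num)
      · simpa [encodeA, encodeB, hc, levelsB, lvlOf, prevOf] using ih 1 (by norm_num)
      · simpa [encodeA, encodeB, hc, levelsB, lvlOf, prevOf] using ih 2 (by norm_num)
      · simpa [encodeA, encodeB, hc, levelsB, lvlOf, prevOf] using ih 3 (by norm_num)

-- ===== VERDICT (by name: the statement is the Claim_ definition above) =====
theorem encode_MLT3_spec : Claim_equal_encode_MLT3 := by
  intro binary _
  unfold Spec_encode_MLT3 encode_MLT3 encode_MLT3_alt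
  simpa [lvlOf, prevOf] using encodeA_eq_encodeB binary.toList 0 (by norm_num)
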